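-- pv_equiv track=rewrite | github.com/YonatanMyers/web_scraping | Solver/Solver.py | get_team_names_from_row
-- ===== SOURCE A (Python) =====
-- def get_team_names_from_row(row_in_A, ind_2_team_dict):
--     t0 = ''
--     t1 = ''
--     for i, val in zip(range(len(row_in_A)), row_in_A):
--         if val > 0:
--             if t0 == '':
--                 t0 = ind_2_team_dict[i]
--         elif val < 0:
--             t1 = ind_2_team_dict[i]
--
--     return (t0, t1)
-- ===== SOURCE B (Python) =====
-- def get_team_names_from_row(row_in_A, ind_2_team_dict):
--     t0 = next((ind_2_team_dict[i] for i, v in enumerate(row_in_A) if v > 0), '')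
--     t1 = next((ind_2_team_dict[i] for i in reversed(range(len(row_in_A))) if row_in_A[i] < 0), '')
--     return (t0, t1)
-- ===== Notes on version B (the rewrite author's own statement) =====
-- stated objective: simpler
-- what changed: Replaces A's single forward loop with a mutable (t0,t1) accumulator by two independent searches: a forward search for the first positive index and a backward search for the last negative index, each a one-line next(...) with default ''.
-- outside the precondition, e.g. on get_team_names_from_row([1, 2], {0: '', 1: 'x'}): A returns ('x', ''), B returns ('', '')
import Mathlib
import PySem

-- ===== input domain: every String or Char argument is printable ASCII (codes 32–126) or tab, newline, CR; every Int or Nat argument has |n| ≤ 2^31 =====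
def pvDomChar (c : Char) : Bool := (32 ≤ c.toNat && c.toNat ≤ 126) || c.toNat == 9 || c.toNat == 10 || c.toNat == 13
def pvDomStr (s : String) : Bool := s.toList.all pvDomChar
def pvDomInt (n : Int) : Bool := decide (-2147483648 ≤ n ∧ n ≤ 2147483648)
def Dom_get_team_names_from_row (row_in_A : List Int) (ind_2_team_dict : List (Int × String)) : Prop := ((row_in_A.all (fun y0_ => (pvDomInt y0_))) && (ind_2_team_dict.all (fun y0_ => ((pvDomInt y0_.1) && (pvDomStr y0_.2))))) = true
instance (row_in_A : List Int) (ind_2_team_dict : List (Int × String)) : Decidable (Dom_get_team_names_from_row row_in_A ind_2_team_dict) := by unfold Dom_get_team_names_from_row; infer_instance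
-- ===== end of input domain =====

-- B computes the two components independently (forward search for the first positive,
-- backward search for the last negative) instead of A's single accumulator loop: simpler.

-- shared primitive: dict lookup (first match in the association list), none = KeyError
def pvLookup? (d : List (Int × String)) (k : Int) : Option String :=
  (d.find? (fun p => p.1 == k)).map (·.2)

-- enumerate(row) starting at index i (used by both ports and by Pre_)
def pvEnum (i : Int) : List Int → List (Int × Int)
  | [] => []
  | v :: r => (i, v) :: pvEnum (i + 1) r

-- ===== PORT A =====
-- A's for-loop over zip(range(len(row)), row) with mutable state (t0, t1);
-- the dict lookup ind_2_team_dict[i] is totalised with getD "" (Pre_ excludes the KeyError inputs).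
def pvALoop (d : List (Int × String)) : List (Int × Int) → String × String → String × String
  | [], st => st
  | (i, v) :: rest, (t0, t1) =>
    if v > 0 then
      pvALoop d rest ((if t0 = "" then (pvLookup? d i).getD "" else t0), t1)
    else if v < 0 then
      pvALoop d rest (t0, (pvLookup? d i).getD "")
    else
      pvALoop d rest (t0, t1)

def get_team_names_from_row (row_in_A : List Int) (ind_2_team_dict : List (Int × String)) : String × String :=
  pvALoop ind_2_team_dict (pvEnum 0 row_in_A) ("", "")

-- ===== PORT B =====
-- first generator: forward scan, first v > 0
def pvFirstPos (d : List (Int × String)) : List (Int × Int) → String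
  | [] => ""
  | (i, v) :: rest => if v > 0 then (pvLookup? d i).getD "" else pvFirstPos d rest

-- second generator: scan of reversed(range(len(row))) testing row[i] < 0, first hit
def pvLastNeg (d : List (Int × String)) : List (Int × Int) → String
  | [] => ""
  | (i, v) :: rest => if v < 0 then (pvLookup? d i).getD "" else pvLastNeg d rest

def get_team_names_from_row_alt (row_in_A : List Int) (ind_2_team_dict : List (Int × String)) : String × String :=
  (pvFirstPos ind_2_team_dict (pvEnum 0 row_in_A),
   pvLastNeg ind_2_team_dict ((pvEnum 0 row_in_A).reverse))

-- ===== PRECONDITION & SPEC =====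
-- Pre_ excludes (a) inputs on which A raises KeyError (a negative-valued index, or the first
-- positive-valued index, missing from the dict) and (b) inputs whose first positive-valued index
-- maps to the empty-string team name: there '' doubles as A's not-found sentinel, so whether a
-- later positive index should be consulted is an unspecified corner (A consults it, B does not).
def Pre_get_team_names_from_row (row_in_A : List Int) (ind_2_team_dict : List (Int × String)) : Prop :=
  (∀ j ∈ List.range row_in_A.length, row_in_A[j]! < 0 → (pvLookup? ind_2_team_dict (j : Int)).isSome) ∧
  (((List.range row_in_A.length).find? (fun j => row_in_A[j]! > 0)).all
     (fun j => (pvLookup? ind_2_team_dict (j : Int)).getD "" != "") = true)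

instance (row_in_A : List Int) (ind_2_team_dict : List (Int × String)) : Decidable (Pre_get_team_names_from_row row_in_A ind_2_team_dict) := by unfold Pre_get_team_names_from_row; infer_instance

def pvWitness_get_team_names_from_row : List Int × (List (Int × String)) :=
  ([0, 3, -1, -2], [((0 : Int), "a"), ((1 : Int), "b"), ((2 : Int), "c"), ((3 : Int), "d")])

def Spec_get_team_names_from_row (row_in_A : List Int) (ind_2_team_dict : List (Int × String)) (out : String × String) : Prop := out = get_team_names_from_row_alt row_in_A ind_2_team_dict
instance (row_in_A : List Int) (ind_2_team_dict : List (Int × String)) (out : String × String) : Decidable (Spec_get_team_names_from_row row_in_A ind_2_team_dict out) := by unfold Spec_get_team_names_from_row; infer_instance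

-- ===== CLAIM (what is proved, stated in full; the proofs are below) =====
def Claim_equal_get_team_names_from_row : Prop := ∀ (row_in_A : List Int) (ind_2_team_dict : List (Int × String)), Dom_get_team_names_from_row row_in_A ind_2_team_dict → Pre_get_team_names_from_row row_in_A ind_2_team_dict → Spec_get_team_names_from_row row_in_A ind_2_team_dict (get_team_names_from_row row_in_A ind_2_team_dict)

-- ===== LEMMAS AND PROOFS =====

-- enumerate(row) starting at n is the index/value table over range(len(row))
theorem pvEnum_eq (row : List Int) (n : Nat) :
    pvEnum (n : Int) row = (List.range row.length).map (fun (j : Nat) => (((n + j : Nat) : Int), row[j]!)) := by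
  induction row generalizing n with
  | nil => rfl
  | cons v r ih =>
    simp only [pvEnum, List.length_cons, List.range_succ_eq_map, List.map_cons, List.map_map]
    congr 1
    have h1 : (n : Int) + 1 = ((n + 1 : Nat) : Int) := by push_cast; ring
    rw [h1, ih]
    apply List.map_congr_left
    intro j _
    simp only [Function.comp_apply, Nat.succ_eq_add_one, List.getElem!_eq_getElem?_getD,
      List.getElem?_cons_succ]
    congr 1
    push_cast; ring

-- first component: once t0 is nonempty it is frozen
theorem pvALoop_fst_frozen (d : List (Int × String)) (ps : List (Int × Int)) (t0 t1 : String)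
    (h : t0 ≠ "") : (pvALoop d ps (t0, t1)).1 = t0 := by
  induction ps generalizing t1 with
  | nil => rfl
  | cons p rest ih =>
    obtain ⟨i, v⟩ := p
    simp only [pvALoop]
    split_ifs with h1 h2 <;> simp [ih]

-- first component while t0 = "": A's result is B's forward search, provided the first
-- positive index (if any) looks up to a nonempty name
theorem pvALoop_fst (d : List (Int × String)) (ps : List (Int × Int)) (t1 : String)
    (hp : ∀ q, ps.find? (fun p => p.2 > 0) = some q → (pvLookup? d q.1).getD "" ≠ "") :
    (pvALoop d ps ("", t1)).1 = pvFirstPos d ps := by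
  induction ps generalizing t1 with
  | nil => rfl
  | cons p rest ih =>
    obtain ⟨i, v⟩ := p
    by_cases h1 : v > 0
    · have hne : (pvLookup? d i).getD "" ≠ "" := by
        apply hp (i, v); simp [List.find?, h1]
      simp only [pvALoop, pvFirstPos, if_pos h1, if_true]
      exact pvALoop_fst_frozen d rest _ t1 hne
    · have hp' : ∀ q, rest.find? (fun p => p.2 > 0) = some q → (pvLookup? d q.1).getD "" ≠ "" := by
        intro q hq; apply hp q; simp [List.find?, h1, hq]
      by_cases h2 : v < 0 <;>
        simp only [pvALoop, pvFirstPos, if_neg h1, if_pos, h2, ite_false] <;>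
        exact ih _ hp'

-- appending one pair on the right of the reversed scan = new default for pvLastNeg-with-default
def pvLastNegD (d : List (Int × String)) (dflt : String) : List (Int × Int) → String
  | [] => dflt
  | (i, v) :: rest => if v < 0 then (pvLookup? d i).getD "" else pvLastNegD d dflt rest

theorem pvLastNegD_append (d : List (Int × String)) (xs : List (Int × Int)) (i v : Int) (dflt : String) :
    pvLastNegD d dflt (xs ++ [(i, v)]) =
      pvLastNegD d (if v < 0 then (pvLookup? d i).getD "" else dflt) xs := by
  induction xs with
  | nil => simp [pvLastNegD]
  | cons p rest ih =>
    obtain ⟨j, w⟩ := p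
    simp only [List.cons_append, pvLastNegD, ih]

theorem pvLastNegD_eq (d : List (Int × String)) (ps : List (Int × Int)) :
    pvLastNegD d "" ps = pvLastNeg d ps := by
  induction ps with
  | nil => rfl
  | cons p rest ih => obtain ⟨i, v⟩ := p; simp only [pvLastNegD, pvLastNeg, ih]

-- second component: A's running t1 equals the backward search with t1 as default
theorem pvALoop_snd (d : List (Int × String)) (ps : List (Int × Int)) (t0 t1 : String) :
    (pvALoop d ps (t0, t1)).2 = pvLastNegD d t1 ps.reverse := by
  induction ps generalizing t0 t1 with
  | nil => rfl
  | cons p rest ih =>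
    obtain ⟨i, v⟩ := p
    by_cases h2 : v < 0
    · simp only [pvALoop, List.reverse_cons, pvLastNegD_append, if_pos h2,
        if_neg (show ¬ v > 0 by omega)]
      exact ih t0 _
    · simp only [pvALoop, List.reverse_cons, pvLastNegD_append, if_neg h2]
      split_ifs <;> exact ih _ _

-- ===== VERDICT (by name: the statement is the Claim_ definition above) =====
theorem get_team_names_from_row_spec : Claim_equal_get_team_names_from_row := by
  intro row d _hDom hPre
  obtain ⟨_hneg, hpos⟩ := hPre
  unfold Spec_get_team_names_from_row get_team_names_from_row get_team_names_from_row_alt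
  have he : pvEnum 0 row = (List.range row.length).map (fun (j : Nat) => ((j : Int), row[j]!)) := by
    have := pvEnum_eq row 0
    simpa using this
  apply Prod.ext
  · rw [pvALoop_fst]
    intro q hq
    rw [he, List.find?_map] at hq
    obtain ⟨j, hj, rfl⟩ := Option.map_eq_some_iff.mp hq
    have hj' : (List.range row.length).find? (fun j => row[j]! > 0) = some j := hj
    rw [hj'] at hpos
    simpa using hpos
  · rw [pvALoop_snd, pvLastNegD_eq]
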